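-- pv_equiv track=rewrite | github.com/JJGO/pylot | analysis/collect.py | shorthand_names
-- ===== SOURCE A (Python) =====
-- from collections import Counter
--
-- def shorthand_names(names):
--     cols = []
--     for c in names:
--         parts = c.split(".")
--         for i, _ in enumerate(parts, start=1):
--             cols.append("_".join(parts[-i:]))
--     counts = Counter(cols)
--     column_renames = {}
--     for c in names:
--         parts = c.split(".")
--         for i, _ in enumerate(parts, start=1):
--             new_name = "_".join(parts[-i:])
--             if counts[new_name] == 1:
--                 column_renames[c] = new_name
--                 break
--     return column_renames
-- ===== SOURCE B (Python) =====
-- def _suffixes(name):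
--     # dot-suffixes of `name` joined by "_", shortest first, built incrementally
--     sufs = []
--     acc = ""
--     for p in reversed(name.split(".")):
--         acc = p if not sufs else p + "_" + acc
--         sufs.append(acc)
--     return sufs
--
--
-- def _total_count(names, s):
--     # how many times `s` occurs among all suffix shorthands of all names
--     t = 0
--     for n in names:
--         for cand in _suffixes(n):
--             if cand == s:
--                 t += 1
--     return t
--
--
-- def shorthand_names(names):
--     renames = {}
--     for n in names:
--         for s in _suffixes(n):
--             if _total_count(names, s) == 1:
--                 renames[n] = s
--                 break
--     return renames
-- ===== Notes on version B (the rewrite author's own statement) =====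
-- stated objective: alternative
-- what changed: B drops A's staged pipeline (materialize all candidate suffixes into a list, hash-count with a Counter, re-enumerate to pick): it is a single pass over names that builds each name's suffixes once incrementally and tests uniqueness of each candidate on demand by a direct scan over all names' suffixes, taking the first with global occurrence count 1; no candidate list and no Counter exist.
import Mathlib
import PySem

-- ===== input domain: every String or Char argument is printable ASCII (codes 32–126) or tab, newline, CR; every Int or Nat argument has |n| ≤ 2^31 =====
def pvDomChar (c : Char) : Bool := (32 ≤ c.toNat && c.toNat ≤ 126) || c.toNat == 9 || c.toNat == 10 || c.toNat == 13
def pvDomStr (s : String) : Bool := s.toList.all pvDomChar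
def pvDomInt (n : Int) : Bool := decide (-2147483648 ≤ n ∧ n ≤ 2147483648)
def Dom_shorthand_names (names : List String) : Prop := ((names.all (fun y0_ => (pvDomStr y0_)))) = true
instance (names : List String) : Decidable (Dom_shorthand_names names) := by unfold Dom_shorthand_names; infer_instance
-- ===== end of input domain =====

-- B replaces A's materialize-candidates/Counter/re-enumerate pipeline by one pass with an on-demand
-- brute-force uniqueness scan (alternative decomposition; not faster).

-- ===== PORT A =====
-- the inner 'for i, _ in enumerate(parts, 1): … if counts[nn] == 1: …; break' loop of A's second pass
def pvPickA (counts : PySem.Dict String Int) (parts : List String) : List Int → Option String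
  | [] => none
  | i :: rest =>
    let new_name := PySem.Str.join "_" (PySem.List.slice parts (some (-i)) none)
    if counts.getD new_name 0 == 1 then some new_name else pvPickA counts parts rest

def shorthand_names (names : List String) : List (String × String) :=
  -- c.split(".") : the separator is the nonempty literal ".", so split? is always `some`
  let cols : List String := names.foldl (fun cols c =>
    let parts := (PySem.Str.split? c ".").getD []
    (PySem.List.pyRange 1 (parts.length + 1) 1).foldl (fun cols i =>
      cols ++ [PySem.Str.join "_" (PySem.List.slice parts (some (-i)) none)]) cols) []
  let counts := PySem.Dict.counter cols
  (names.foldl (fun column_renames c =>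
    let parts := (PySem.Str.split? c ".").getD []
    match pvPickA counts parts (PySem.List.pyRange 1 (parts.length + 1) 1) with
    | some new_name => column_renames.insert c new_name
    | none => column_renames) PySem.Dict.empty).items

-- ===== PORT B =====
-- _suffixes from Source B: fold over the reversed parts, growing `acc` by prepending 'p + "_"'
def pvSuffixes (name : String) : List String :=
  ((((PySem.Str.split? name ".").getD []).reverse.foldl
    (fun (st : List String × String) p =>
      let acc := if st.1.isEmpty then p else p ++ "_" ++ st.2
      (st.1 ++ [acc], acc)) ([], ""))).1

-- _total_count from Source B: nested scan, 'if cand == s: t += 1'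
def pvTotalCount (names : List String) (s : String) : Int :=
  names.foldl (fun t n =>
    (pvSuffixes n).foldl (fun t cand => if cand == s then t + 1 else t) t) 0

def shorthand_names_alt (names : List String) : List (String × String) :=
  (names.foldl (fun renames n =>
    match (pvSuffixes n).find? (fun s => pvTotalCount names s == 1) with
    | some s => renames.insert n s
    | none => renames) PySem.Dict.empty).items

-- ===== PRECONDITION & SPEC =====
def Spec_shorthand_names (names : List String) (out : List (String × String)) : Prop := out = shorthand_names_alt names
instance (names : List String) (out : List (String × String)) : Decidable (Spec_shorthand_names names out) := by unfold Spec_shorthand_names; infer_instance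

-- ===== CLAIM (what is proved, stated in full; the proofs are below) =====
def Claim_equal_shorthand_names : Prop := ∀ (names : List String), Dom_shorthand_names names → Spec_shorthand_names names (shorthand_names names)

-- ===== LEMMAS AND PROOFS =====

-- A's candidate list for one name: '_'.join(parts[-i:]) for i = 1 .. len(parts)
def pvCandA (parts : List String) : List String :=
  (PySem.List.pyRange 1 (parts.length + 1) 1).map
    (fun i => PySem.Str.join "_" (PySem.List.slice parts (some (-i)) none))

theorem pvPickA_eq_find (counts : PySem.Dict String Int) (parts : List String) (L : List Int) :
    pvPickA counts parts L =
      (L.map (fun i => PySem.Str.join "_" (PySem.List.slice parts (some (-i)) none))).find?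
        (fun s => counts.getD s 0 == 1) := by
  induction L with
  | nil => rfl
  | cons i rest ih =>
    simp only [pvPickA, List.map_cons]
    split_ifs with h
    · rw [List.find?_cons_of_pos (by simpa using h)]
    · rw [List.find?_cons_of_neg (by simpa using h), ih]

theorem pvJoin_cons_cons (p : String) (cs : List String) (h : cs ≠ []) :
    PySem.Str.join "_" (p :: cs) = p ++ "_" ++ PySem.Str.join "_" cs := by
  obtain ⟨q, rest, rfl⟩ := List.exists_cons_of_ne_nil h
  apply String.ext
  simp [PySem.Str.join, PySem.Chars.join_cons_cons]

-- the incremental fold of pvSuffixes, characterised on an arbitrary (reversed) list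
theorem pvSuffixFold (cs : List String) (hcs : cs ≠ []) :
    cs.foldl (fun (st : List String × String) p =>
        let acc := if st.1.isEmpty then p else p ++ "_" ++ st.2
        (st.1 ++ [acc], acc)) ([], "")
      = ((List.range cs.length).map (fun k => PySem.Str.join "_" ((cs.take (k + 1)).reverse)),
         PySem.Str.join "_" cs.reverse) := by
  induction cs using List.reverseRecOn with
  | nil => simp at hcs
  | append_singleton cs p ih =>
    rcases eq_or_ne cs [] with rfl | hne
    · simp [PySem.Str.join, PySem.Chars.join_singleton]
    · rw [List.foldl_append, ih hne]
      simp only [List.foldl_cons, List.foldl_nil]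
      have hrev : cs.reverse ≠ [] := by simpa using hne
      have hlnil : ((List.range cs.length).map
          (fun k => PySem.Str.join "_" ((cs.take (k + 1)).reverse))).isEmpty = false := by
        simp [List.length_eq_zero_iff.not.mpr hne]
      have hjoin : PySem.Str.join "_" ((cs ++ [p]).reverse)
          = p ++ "_" ++ PySem.Str.join "_" cs.reverse := by
        rw [List.reverse_append, List.reverse_singleton, List.singleton_append,
          pvJoin_cons_cons p cs.reverse hrev]
      simp only [hlnil, if_neg Bool.false_ne_true, Prod.mk.injEq]
      refine ⟨?_, by rw [hjoin]⟩
      rw [List.length_append, List.length_cons, List.length_nil, List.range_succ, List.map_append]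
      congr 1
      · apply List.map_congr_left
        intro k hk
        have hk' : k + 1 ≤ cs.length := List.mem_range.mp hk
        rw [List.take_append_of_le_length hk']
      · simp only [List.map_cons, List.map_nil]
        have ht : (cs ++ [p]).take (cs.length + 1) = cs ++ [p] := by
          apply List.take_of_length_le; simp
        rw [ht, hjoin]

-- list-level fact: taking k+1 from the reverse and reversing back drops all but the last k+1
theorem pvTakeRevRev (l : List String) (m : Nat) :
    (l.reverse.take m).reverse = l.drop (l.length - m) := by
  rw [List.take_reverse, List.reverse_reverse]

theorem pvSuffixes_eq_candA (n : String) :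
    pvSuffixes n = pvCandA ((PySem.Str.split? n ".").getD []) := by
  unfold pvSuffixes pvCandA
  set parts := (PySem.Str.split? n ".").getD [] with hp
  rcases eq_or_ne parts [] with h0 | hne
  · simp [h0, PySem.List.pyRange_one_eq_nil]
  · have hrev : parts.reverse ≠ [] := by simpa using hne
    rw [pvSuffixFold _ hrev]
    simp only [List.length_reverse]
    rw [PySem.List.pyRange_one]
    have hlen : ((parts.length : Int) + 1 - 1).toNat = parts.length := by omega
    rw [hlen, List.map_map]
    apply List.map_congr_left
    intro k hk
    have hk' : k < parts.length := List.mem_range.mp hk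
    simp only [Function.comp_apply]
    have hslice : PySem.List.slice parts (some (-(1 + (k : Int)))) none
        = parts.drop (parts.length - (k + 1)) := by
      have : -(1 + (k : Int)) = -(((k + 1 : Nat) : Int)) := by push_cast; ring
      rw [this, PySem.List.slice_from_neg_natCast parts (k + 1) (by omega)]
    rw [hslice, pvTakeRevRev]

-- B's brute-force scan computes exactly the count of s in the concatenation of all candidate lists
theorem pvTotalCount_eq_count (names : List String) (s : String) :
    pvTotalCount names s
      = ((names.flatMap (fun c => pvCandA ((PySem.Str.split? c ".").getD []))).count s : Int) := by
  unfold pvTotalCount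
  induction names using List.reverseRecOn with
  | nil => rfl
  | append_singleton names n ih =>
    rw [List.foldl_append, ih, List.foldl_cons, List.foldl_nil,
      PySem.List.foldl_beq_add_one, pvSuffixes_eq_candA, List.flatMap_append]
    simp [List.count_append]

theorem shorthand_names_eq (names : List String) :
    shorthand_names names = shorthand_names_alt names := by
  simp only [shorthand_names, shorthand_names_alt]
  -- A's cols list is the concatenation of the candidate lists
  have hcols : (names.foldl (fun cols c =>
        let parts := (PySem.Str.split? c ".").getD []
        (PySem.List.pyRange 1 (parts.length + 1) 1).foldl (fun cols i =>
          cols ++ [PySem.Str.join "_" (PySem.List.slice parts (some (-i)) none)]) cols) [])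
      = names.flatMap (fun c => pvCandA ((PySem.Str.split? c ".").getD [])) := by
    calc (names.foldl (fun cols c =>
          let parts := (PySem.Str.split? c ".").getD []
          (PySem.List.pyRange 1 (parts.length + 1) 1).foldl (fun cols i =>
            cols ++ [PySem.Str.join "_" (PySem.List.slice parts (some (-i)) none)]) cols) [])
        = names.foldl (fun cols c => cols ++ pvCandA ((PySem.Str.split? c ".").getD [])) [] :=
          PySem.List.foldl_congr_mem _ _ _ _
            (fun cols c _ => PySem.List.foldl_append_singleton_eq_map _ _ _)
      _ = [] ++ names.flatMap (fun c => pvCandA ((PySem.Str.split? c ".").getD [])) :=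
          PySem.List.foldl_append_eq_flatMap _ _ _
      _ = _ := List.nil_append _
  rw [hcols]
  -- the two second passes agree pointwise on the names
  congr 1
  apply PySem.List.foldl_congr_mem
  intro renames c _
  rw [pvPickA_eq_find, pvSuffixes_eq_candA c]
  have hpred : (fun s => (PySem.Dict.counter
        (names.flatMap (fun c => pvCandA ((PySem.Str.split? c ".").getD [])))).getD s 0 == 1)
      = (fun s => pvTotalCount names s == 1) :=
    funext fun s => by rw [PySem.Dict.getD_counter, pvTotalCount_eq_count]
  rw [hpred]
  simp only [pvCandA]

-- ===== VERDICT (by name: the statement is the Claim_ definition above) =====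
theorem shorthand_names_spec : Claim_equal_shorthand_names := by
  intro names _
  unfold Spec_shorthand_names
  exact shorthand_names_eq names
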